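-- pv_equiv track=rewrite | github.com/andresmegias/gildas-class-python | classcombine.py | enlarge_mask
-- ===== SOURCE A (Python) =====
-- import copy
--
-- def enlarge_mask(input_cond, iters=1):
--     """
--     Enlarge the input mask according to the number iterations.
--
--     Parameters
--     ----------
--     input_cond : array (bool)
--         Logic array which defines the input mask.
--     iters : int, optional
--         Number of units thath the mask will grow in each direction. The
--         default is 1.
--
--     Returns
--     -------
--     cond : array (bool)
--         Resultant logic array.
--
--     """
--     cond = copy.copy(input_cond)
--     N = len(cond)
--     for j in range(iters):
--         for i in range(0,N-1):
--             if input_cond[i] == False and input_cond[i+1] == True: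
--                 cond[i] = True
--         for i in range(1,N):
--             if input_cond[i-1] == True and input_cond[i] == False:
--                 cond[i] = True
--         input_cond = copy.copy(cond)
--     return cond
-- ===== SOURCE B (Python) =====
-- def enlarge_mask(input_cond, iters=1):
--     """Two-pass distance transform: True iff some True lies within iters cells."""
--     t = max(iters, 0)
--
--     def dists(xs):
--         ds, d = [], None
--         for x in xs:
--             d = 0 if x else (None if d is None else d + 1)
--             ds.append(d)
--         return ds
--
--     fwd = dists(input_cond)
--     bwd = dists(input_cond[::-1])[::-1]
--     return [(f is not None and f <= t) or (b is not None and b <= t)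
--             for f, b in zip(fwd, bwd)]
-- ===== Notes on version B (the rewrite author's own statement) =====
-- stated objective: faster
-- what changed: Replaces the iters-fold repetition of a neighbour-propagation sweep by a single two-pass distance transform (distance to nearest True from the left and from the right) thresholded by max(iters,0).
import Mathlib
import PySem

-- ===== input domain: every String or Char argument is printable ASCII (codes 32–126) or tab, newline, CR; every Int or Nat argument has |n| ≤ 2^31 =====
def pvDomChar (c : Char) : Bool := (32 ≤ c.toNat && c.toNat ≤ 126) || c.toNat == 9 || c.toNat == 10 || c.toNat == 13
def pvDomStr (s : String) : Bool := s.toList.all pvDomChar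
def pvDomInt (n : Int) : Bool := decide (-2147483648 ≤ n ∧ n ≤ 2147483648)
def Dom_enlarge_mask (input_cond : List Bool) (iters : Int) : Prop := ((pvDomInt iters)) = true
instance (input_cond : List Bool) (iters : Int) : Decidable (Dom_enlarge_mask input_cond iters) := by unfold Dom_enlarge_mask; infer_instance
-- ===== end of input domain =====

-- B replaces A's iters-fold neighbour sweep by a single two-pass distance transform (O(N) work instead of O(iters*N) loop iterations by algorithm structure).

-- ===== PORT A =====
-- one outer iteration of A's loop: two index sweeps setting cells next to a True cell
def stepA (inp : List Bool) : List Bool :=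
  let N := inp.length
  let c1 := (List.range (N - 1)).foldl (fun c i =>
      if inp.getD i false = false ∧ inp.getD (i + 1) false = true then c.set i true else c) inp
  (List.range (N - 1)).foldl (fun c i =>
      if inp.getD i false = true ∧ inp.getD (i + 1) false = false then c.set (i + 1) true else c) c1

def enlarge_mask (input_cond : List Bool) (iters : Int) : List Bool :=
  stepA^[iters.toNat] input_cond

-- ===== PORT B =====
-- d = 0 if x else (None if d is None else d+1)
def bstep (x : Bool) (d : Option Nat) : Option Nat :=
  if x then some 0 else d.map (· + 1)

-- the dists() loop of Source B
def distsGo : Option Nat → List Bool → List (Option Nat)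
  | _, [] => []
  | d, x :: xs => let d' := bstep x d; d' :: distsGo d' xs

-- "f is not None and f <= t"
def nearI : Option Nat → Int → Bool
  | none, _ => false
  | some d, t => decide ((d : Int) ≤ t)

def enlarge_mask_alt (input_cond : List Bool) (iters : Int) : List Bool :=
  let t := max iters 0
  let f := distsGo none input_cond
  let b := (distsGo none input_cond.reverse).reverse
  (f.zip b).map (fun p => nearI p.1 t || nearI p.2 t)

-- ===== PRECONDITION & SPEC =====
def Spec_enlarge_mask (input_cond : List Bool) (iters : Int) (out : List Bool) : Prop := out = enlarge_mask_alt input_cond iters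
instance (input_cond : List Bool) (iters : Int) (out : List Bool) : Decidable (Spec_enlarge_mask input_cond iters out) := by unfold Spec_enlarge_mask; infer_instance

-- ===== CLAIM (what is proved, stated in full; the proofs are below) =====
def Claim_equal_enlarge_mask : Prop := ∀ (input_cond : List Bool) (iters : Int), Dom_enlarge_mask input_cond iters → Spec_enlarge_mask input_cond iters (enlarge_mask input_cond iters)

-- ===== LEMMAS AND PROOFS =====

theorem foldlSet_length (P : Nat → Prop) [DecidablePred P] (f : Nat → Nat)
    (l : List Nat) (c : List Bool) :
    (l.foldl (fun c i => if P i then c.set (f i) true else c) c).length = c.length := by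
  induction l generalizing c with
  | nil => rfl
  | cons a l ih =>
    simp only [List.foldl_cons]
    rw [ih]
    split <;> simp

theorem getD_set_true (c : List Bool) (j k : Nat) :
    ((c.set j true).getD k false = true ↔ ((j = k ∧ j < c.length) ∨ c.getD k false = true)) := by
  rcases Nat.lt_or_ge k c.length with hk | hk
  · rw [List.getD_eq_getElem _ _ (by simpa using hk), List.getD_eq_getElem _ _ hk,
      List.getElem_set]
    split
    · simp_all
    · constructor
      · exact fun h => Or.inr h
      · rintro (⟨h1, h2⟩ | h)
        · omega
        · exact h
  · rw [List.getD_eq_default _ _ (by simpa using hk), List.getD_eq_default _ _ hk]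
    constructor
    · intro h; exact absurd h (by simp)
    · rintro (⟨h1, h2⟩ | h)
      · omega
      · exact absurd h (by simp)

theorem foldlSet_getD (P : Nat → Prop) [DecidablePred P] (f : Nat → Nat)
    (l : List Nat) (c : List Bool) (k : Nat) :
    ((l.foldl (fun c i => if P i then c.set (f i) true else c) c).getD k false = true ↔
      (∃ i ∈ l, P i ∧ f i = k ∧ f i < c.length) ∨ c.getD k false = true) := by
  induction l generalizing c with
  | nil => simp
  | cons a l ih =>
    simp only [List.foldl_cons]
    rw [ih]
    by_cases hP : P a
    · simp only [if_pos hP, List.length_set, getD_set_true, List.mem_cons]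
      constructor
      · rintro (⟨i, hi, h⟩ | ⟨h1, h2⟩ | h)
        · exact Or.inl ⟨i, Or.inr hi, h⟩
        · exact Or.inl ⟨a, Or.inl rfl, hP, h1, by omega⟩
        · exact Or.inr h
      · rintro (⟨i, rfl | hi, hPi, hfi, hlen⟩ | h)
        · exact Or.inr (Or.inl ⟨hfi, hlen⟩)
        · exact Or.inl ⟨i, hi, hPi, hfi, hlen⟩
        · exact Or.inr (Or.inr h)
    · simp only [if_neg hP, List.mem_cons]
      constructor
      · rintro (⟨i, hi, h⟩ | h)
        · exact Or.inl ⟨i, Or.inr hi, h⟩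
        · exact Or.inr h
      · rintro (⟨i, rfl | hi, hPi, h⟩ | h)
        · exact absurd hPi hP
        · exact Or.inl ⟨i, hi, hPi, h⟩
        · exact Or.inr h

theorem stepA_length (inp : List Bool) : (stepA inp).length = inp.length := by
  unfold stepA
  rw [foldlSet_length, foldlSet_length]

theorem stepA_getD (inp : List Bool) (k : Nat) (hk : k < inp.length) :
    ((stepA inp).getD k false = true ↔
      (inp.getD k false = true ∨
       (k + 1 < inp.length ∧ inp.getD (k + 1) false = true) ∨
       (1 ≤ k ∧ inp.getD (k - 1) false = true))) := by
  unfold stepA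
  rw [foldlSet_getD, foldlSet_getD, foldlSet_length]
  simp only [List.mem_range]
  constructor
  · rintro (⟨i, hi, ⟨hT, hF⟩, rfl, hlen⟩ | ⟨i, hi, ⟨hF, hT⟩, rfl, hlen⟩ | h)
    · right; right; refine ⟨by omega, ?_⟩; simpa using hT
    · right; left; exact ⟨by omega, hT⟩
    · left; exact h
  · rintro (h | ⟨h1, h2⟩ | ⟨h1, h2⟩)
    · exact Or.inr (Or.inr h)
    · by_cases hk0 : inp.getD k false = true
      · exact Or.inr (Or.inr hk0)
      · right; left
        exact ⟨k, by omega, ⟨by simpa using hk0, h2⟩, rfl, by omega⟩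
    · by_cases hk0 : inp.getD k false = true
      · exact Or.inr (Or.inr hk0)
      · left
        refine ⟨k - 1, by omega, ⟨h2, ?_⟩, by omega, by omega⟩
        have : k - 1 + 1 = k := by omega
        rw [this]; simpa using hk0

theorem iter_length (t : Nat) (inp : List Bool) :
    (stepA^[t] inp).length = inp.length := by
  induction t generalizing inp with
  | zero => rfl
  | succ t ih =>
    rw [Function.iterate_succ_apply']
    rw [stepA_length, ih]

theorem iter_getD (t : Nat) (inp : List Bool) (i : Nat) (hi : i < inp.length) :
    ((stepA^[t] inp).getD i false = true ↔
      ∃ j, j < inp.length ∧ inp.getD j false = true ∧ i ≤ j + t ∧ j ≤ i + t) := by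
  induction t generalizing i with
  | zero =>
    simp only [Function.iterate_zero, id]
    constructor
    · intro h; exact ⟨i, hi, h, by omega, by omega⟩
    · rintro ⟨j, hj, h, h1, h2⟩
      have : j = i := by omega
      subst this; exact h
  | succ t ih =>
    rw [Function.iterate_succ_apply']
    rw [stepA_getD _ i (by rw [iter_length]; exact hi)]
    rw [iter_length]
    constructor
    · rintro (h | ⟨h1, h2⟩ | ⟨h1, h2⟩)
      · rcases (ih i hi).mp h with ⟨j, hj, hv, h1, h2⟩
        exact ⟨j, hj, hv, by omega, by omega⟩
      · rcases (ih (i + 1) h1).mp h2 with ⟨j, hj, hv, hh1, hh2⟩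
        exact ⟨j, hj, hv, by omega, by omega⟩
      · rcases (ih (i - 1) (by omega)).mp h2 with ⟨j, hj, hv, hh1, hh2⟩
        exact ⟨j, hj, hv, by omega, by omega⟩
    · rintro ⟨j, hj, hv, h1, h2⟩
      by_cases hc : i ≤ j + t ∧ j ≤ i + t
      · exact Or.inl ((ih i hi).mpr ⟨j, hj, hv, hc.1, hc.2⟩)
      · rcases Nat.lt_or_ge (j + t) i with hgt | hge
        · -- j + t + 1 = i, use left neighbour i-1
          right; right
          refine ⟨by omega, (ih (i - 1) (by omega)).mpr ⟨j, hj, hv, by omega, by omega⟩⟩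
        · -- i + t + 1 = j, use right neighbour i+1
          right; left
          refine ⟨by omega, (ih (i + 1) (by omega)).mpr ⟨j, hj, hv, by omega, by omega⟩⟩

theorem distsGo_length (d : Option Nat) (xs : List Bool) :
    (distsGo d xs).length = xs.length := by
  induction xs generalizing d with
  | nil => rfl
  | cons x xs ih => simp [distsGo, ih]

theorem distsGo_cons (d : Option Nat) (x : Bool) (xs : List Bool) :
    distsGo d (x :: xs) = bstep x d :: distsGo (bstep x d) xs := rfl

theorem bstep_true (d : Option Nat) : bstep true d = some 0 := rfl

theorem bstep_false (d : Option Nat) : bstep false d = d.map (· + 1) := rfl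

theorem nearI_none (t : Int) : nearI none t = false := rfl

theorem nearI_some (d : Nat) (t : Int) : nearI (some d) t = decide ((d : Int) ≤ t) := rfl

theorem distsGo_near (xs : List Bool) (d : Option Nat) (t : Int) (i : Nat)
    (hi : i < xs.length) :
    (nearI ((distsGo d xs).getD i none) t = true ↔
      ((∃ j, j < xs.length ∧ j ≤ i ∧ xs.getD j false = true ∧ (i : Int) - j ≤ t) ∨
       (∃ d0, d = some d0 ∧ (d0 : Int) + i + 1 ≤ t))) := by
  induction xs generalizing d i with
  | nil => exact absurd hi (by simp)
  | cons x xs ih =>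
    cases i with
    | zero =>
      rw [distsGo_cons, List.getD_cons_zero]
      cases x with
      | true =>
        rw [bstep_true, nearI_some]
        simp only [decide_eq_true_eq]
        constructor
        · intro h
          exact Or.inl ⟨0, by simp, Nat.le_refl 0, by simp, by push_cast; omega⟩
        · rintro (⟨j, hj, hj0, hv, hd⟩ | ⟨d0, rfl, hd⟩)
          · push_cast; omega
          · push_cast; omega
      | false =>
        rw [bstep_false]
        cases d with
        | none =>
          rw [Option.map_none, nearI_none]
          constructor
          · intro h; exact absurd h (by simp)
          · rintro (⟨j, hj, hj0, hv, hd⟩ | ⟨d0, hd, _⟩)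
            · have hj0' : j = 0 := by omega
              subst hj0'; simp at hv
            · exact absurd hd (by simp)
        | some d0 =>
          rw [Option.map_some, nearI_some]
          simp only [decide_eq_true_eq]
          constructor
          · intro h; right; exact ⟨d0, rfl, by push_cast at h ⊢; omega⟩
          · rintro (⟨j, hj, hj0, hv, hd⟩ | ⟨d1, hd, hle⟩)
            · have hj0' : j = 0 := by omega
              subst hj0'; simp at hv
            · have hdd : d0 = d1 := by simpa using hd
              subst hdd; push_cast at hle ⊢; omega
    | succ m =>
      rw [distsGo_cons, List.getD_cons_succ, ih (bstep x d) m (by simpa using hi)]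
      constructor
      · rintro (⟨j, hj, hjm, hv, hd⟩ | ⟨d0, hd, hle⟩)
        · exact Or.inl ⟨j + 1, by simpa using hj, by omega, by simpa using hv,
            by push_cast at hd ⊢; omega⟩
        · cases x with
          | true =>
            rw [bstep_true] at hd
            have hd0 : d0 = 0 := by simpa using hd.symm
            subst hd0
            exact Or.inl ⟨0, by simp, by omega, by simp, by push_cast at hle ⊢; omega⟩
          | false =>
            rw [bstep_false] at hd
            rcases Option.map_eq_some_iff.mp hd with ⟨d1, hd1, hEq⟩
            exact Or.inr ⟨d1, hd1, by push_cast at hle ⊢; omega⟩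
      · rintro (⟨j, hj, hjm, hv, hd⟩ | ⟨d0, hd, hle⟩)
        · cases j with
          | zero =>
            have hx : x = true := by simpa using hv
            subst hx
            exact Or.inr ⟨0, by rw [bstep_true], by push_cast at hd ⊢; omega⟩
          | succ j' =>
            exact Or.inl ⟨j', by simpa using hj, by omega, by simpa using hv,
              by push_cast at hd ⊢; omega⟩
        · cases x with
          | true =>
            exact Or.inr ⟨0, by rw [bstep_true], by push_cast at hle ⊢; omega⟩
          | false =>
            exact Or.inr ⟨d0 + 1, by rw [bstep_false, hd, Option.map_some],
              by push_cast at hle ⊢; omega⟩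

theorem alt_length (inp : List Bool) (iters : Int) :
    (enlarge_mask_alt inp iters).length = inp.length := by
  show (((distsGo none inp).zip (distsGo none inp.reverse).reverse).map
      (fun p => nearI p.1 (max iters 0) || nearI p.2 (max iters 0))).length = inp.length
  rw [List.length_map, List.length_zip, distsGo_length, List.length_reverse,
    distsGo_length, List.length_reverse]
  exact Nat.min_self _

theorem getD_reverse (inp : List Bool) (j : Nat) (hj : j < inp.length) :
    inp.reverse.getD j false = inp.getD (inp.length - 1 - j) false := by
  rw [List.getD_eq_getElem _ _ (by simpa using hj),
    List.getD_eq_getElem _ _ (by omega), List.getElem_reverse]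

theorem alt_getD (inp : List Bool) (iters : Int) (i : Nat) (hi : i < inp.length) :
    ((enlarge_mask_alt inp iters).getD i false = true ↔
      ∃ j, j < inp.length ∧ inp.getD j false = true ∧
        (i : Int) - j ≤ max iters 0 ∧ (j : Int) - i ≤ max iters 0) := by
  set T := max iters 0 with hTdef
  have hT0 : (0 : Int) ≤ T := le_max_right _ _
  have hf : (distsGo none inp).length = inp.length := distsGo_length _ _
  have hbr : (distsGo none inp.reverse).length = inp.length := by
    rw [distsGo_length, List.length_reverse]
  have hzip : ((distsGo none inp).zip (distsGo none inp.reverse).reverse).length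
      = inp.length := by
    rw [List.length_zip, hf, List.length_reverse, hbr]; exact Nat.min_self _
  have hshow : enlarge_mask_alt inp iters =
      ((distsGo none inp).zip (distsGo none inp.reverse).reverse).map
        (fun p => nearI p.1 T || nearI p.2 T) := rfl
  rw [hshow, List.getD_eq_getElem _ _ (by rw [List.length_map, hzip]; exact hi),
    List.getElem_map, List.getElem_zip, Bool.or_eq_true]
  have h1 : ((distsGo none inp)[i]'(by omega) = (distsGo none inp).getD i none) :=
    (List.getD_eq_getElem _ _ (by omega)).symm
  have h2 : (((distsGo none inp.reverse).reverse)[i]'(by rw [List.length_reverse, hbr]; exact hi)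
      = (distsGo none inp.reverse).getD (inp.length - 1 - i) none) := by
    rw [List.getElem_reverse, List.getD_eq_getElem _ _ (by omega)]
    congr 1
    omega
  rw [h1, h2, distsGo_near inp none T i hi,
    distsGo_near inp.reverse none T (inp.length - 1 - i) (by rw [List.length_reverse]; omega)]
  simp only [List.length_reverse, reduceCtorEq, false_and, exists_const, or_false]
  constructor
  · rintro ((⟨j, hj, hjle, hv, hd⟩) | (⟨j', hj', hjle', hv', hd'⟩))
    · exact ⟨j, hj, hv, by omega, by omega⟩
    · rw [getD_reverse _ _ (by omega)] at hv'
      exact ⟨inp.length - 1 - j', by omega, hv', by omega, by omega⟩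
  · rintro ⟨j, hj, hv, hd1, hd2⟩
    rcases Nat.lt_or_ge i j with hlt | hle
    · refine Or.inr ⟨inp.length - 1 - j, by omega, by omega, ?_, by omega⟩
      rw [getD_reverse _ _ (by omega)]
      have hjj : inp.length - 1 - (inp.length - 1 - j) = j := by omega
      rw [hjj]
      exact hv
    · exact Or.inl ⟨j, hj, hle, hv, by omega⟩

-- ===== VERDICT (by name: the statement is the Claim_ definition above) =====
theorem enlarge_mask_spec : Claim_equal_enlarge_mask := by
  intro inp iters _
  show enlarge_mask inp iters = enlarge_mask_alt inp iters
  have hlen1 : (enlarge_mask inp iters).length = inp.length := iter_length _ _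
  have hlen2 : (enlarge_mask_alt inp iters).length = inp.length := alt_length _ _
  apply List.ext_getElem (by rw [hlen1, hlen2])
  intro i h1 h2
  have hi : i < inp.length := by omega
  have hh1 : (enlarge_mask inp iters)[i]'h1 = (enlarge_mask inp iters).getD i false :=
    (List.getD_eq_getElem _ _ h1).symm
  have hh2 : (enlarge_mask_alt inp iters)[i]'h2 = (enlarge_mask_alt inp iters).getD i false :=
    (List.getD_eq_getElem _ _ h2).symm
  rw [hh1, hh2, Bool.eq_iff_iff,
    show enlarge_mask inp iters = stepA^[iters.toNat] inp from rfl,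
    iter_getD iters.toNat inp i hi, alt_getD inp iters i hi,
    show (max iters 0) = ((iters.toNat : Int)) from (Int.toNat_eq_max iters).symm]
  constructor
  · rintro ⟨j, hj, hv, h3, h4⟩
    exact ⟨j, hj, hv, by omega, by omega⟩
  · rintro ⟨j, hj, hv, h3, h4⟩
    exact ⟨j, hj, hv, by omega, by omega⟩
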